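-- pv_equiv track=rewrite | github.com/barking-up-the-binary-tree/interandroid-fictional-language | tools/inject-core-vocabulary-description.py | splitWordDescription
-- ===== SOURCE A (Python) =====
-- from typing import List, Tuple, Dict, Set
--
-- def splitWordDescription(lines: List[str]):
--     row = { "word" : ""}
--     rows = []
--     descriptionPart = []
--     for line in lines:
--         if line[0:6] == '######':
--             if row["word"]:
--                 description = "\n".join(descriptionPart)
--                 row["description"] = description
--                 rows.append(row)
--             word = line[6:].strip()
--             row = { "word" : word }
--             descriptionPart = []
--         else:
--            if line:
--                 descriptionPart.append(line)
--     description = "\n".join(descriptionPart)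
--     row["description"] = description
--     rows.append(row)
--     return rows
-- ===== SOURCE B (Python) =====
-- from typing import List
--
-- def _joinNonEmpty(ls):
--     return "\n".join(l for l in ls if l)
--
-- def splitWordDescription(lines: List[str]):
--     # two-pass: find header indices first, then render one record per header segment
--     idxs = [i for i, l in enumerate(lines) if l.startswith('######')]
--     if not idxs:
--         return [{"word": "", "description": _joinNonEmpty(lines)}]
--     rows = []
--     for i, j in zip(idxs[:-1], idxs[1:]):
--         w = lines[i][6:].strip()
--         if w:
--             rows.append({"word": w, "description": _joinNonEmpty(lines[i + 1:j])})
--     last = idxs[-1]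
--     rows.append({"word": lines[last][6:].strip(),
--                  "description": _joinNonEmpty(lines[last + 1:])})
--     return rows
-- ===== Notes on version B (the rewrite author's own statement) =====
-- stated objective: alternative
-- what changed: Replaced the single-pass incremental state machine (current row dict, pending description accumulator, commit-on-next-header) by a two-pass decomposition: first collect the indices of '######' header lines, then render one record per header segment by slicing the line list, with the header-free case and the final segment handled separately.
import Mathlib
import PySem

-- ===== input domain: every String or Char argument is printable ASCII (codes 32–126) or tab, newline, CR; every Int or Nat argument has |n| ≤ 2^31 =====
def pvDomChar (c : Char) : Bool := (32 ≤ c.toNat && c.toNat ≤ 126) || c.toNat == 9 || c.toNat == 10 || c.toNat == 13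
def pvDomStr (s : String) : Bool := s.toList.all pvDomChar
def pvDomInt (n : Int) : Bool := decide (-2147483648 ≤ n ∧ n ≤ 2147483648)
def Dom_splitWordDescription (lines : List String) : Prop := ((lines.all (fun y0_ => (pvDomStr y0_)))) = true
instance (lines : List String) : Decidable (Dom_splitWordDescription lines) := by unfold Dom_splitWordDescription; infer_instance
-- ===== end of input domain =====

-- B replaces A's one-pass state machine by a two-pass find-header-indices-then-render-segments decomposition (objective: alternative; same cost).

-- ===== PORT A =====
-- loop body of A's for-loop (row, rows, descriptionPart); row["word"] is always present, so getD "" is its exact lookup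
def pvStepA (st : PySem.Dict String String × List (List (String × String)) × List String)
    (line : String) : PySem.Dict String String × List (List (String × String)) × List String :=
  if PySem.Str.slice line (some 0) (some 6) = "######" then
    let rows :=
      if PySem.Dict.getD st.1 "word" "" ≠ "" then
        st.2.1 ++ [(PySem.Dict.insert st.1 "description" (PySem.Str.join "\n" st.2.2)).items]
      else st.2.1
    (⟨[("word", PySem.Str.strip (PySem.Str.slice line (some 6) none))]⟩, rows, [])
  else if line ≠ "" then (st.1, st.2.1, st.2.2 ++ [line]) else st

-- code after A's loop: attach the joined description and append the final row
def pvFinA (st : PySem.Dict String String × List (List (String × String)) × List String) :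
    List (List (String × String)) :=
  st.2.1 ++ [(PySem.Dict.insert st.1 "description" (PySem.Str.join "\n" st.2.2)).items]

def splitWordDescription (lines : List String) : List (List (String × String)) :=
  pvFinA (lines.foldl pvStepA (⟨[("word", "")]⟩, [], []))

-- ===== PORT B =====
def pvJoinNE (ls : List String) : String :=
  PySem.Str.join "\n" (ls.filter (fun l => decide (l ≠ "")))

def pvHeaderB (l : String) : Bool := PySem.Str.startswith l "######"

def pvWordB (l : String) : String := PySem.Str.strip (PySem.Str.slice l (some 6) none)

def splitWordDescription_alt (lines : List String) : List (List (String × String)) :=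
  let idxs := lines.zipIdx.filterMap (fun p => if pvHeaderB p.1 then some p.2 else none)
  if h : idxs = [] then
    [[("word", ""), ("description", pvJoinNE lines)]]
  else
    let rows := (idxs.dropLast.zip idxs.tail).filterMap (fun ij =>
      let w := pvWordB (lines.getD ij.1 "")
      if w ≠ "" then
        some [("word", w), ("description", pvJoinNE ((lines.drop (ij.1 + 1)).take (ij.2 - (ij.1 + 1))))]
      else none)
    let last := idxs.getLast h
    rows ++ [[("word", pvWordB (lines.getD last "")), ("description", pvJoinNE (lines.drop (last + 1)))]]

-- ===== PRECONDITION & SPEC =====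
def Spec_splitWordDescription (lines : List String) (out : List (List (String × String))) : Prop := out = splitWordDescription_alt lines
instance (lines : List String) (out : List (List (String × String))) : Decidable (Spec_splitWordDescription lines out) := by unfold Spec_splitWordDescription; infer_instance

-- ===== CLAIM (what is proved, stated in full; the proofs are below) =====
def Claim_equal_splitWordDescription : Prop := ∀ (lines : List String), Dom_splitWordDescription lines → Spec_splitWordDescription lines (splitWordDescription lines)

-- ===== LEMMAS AND PROOFS =====

-- record [("word", w), ("description", "\n".join(items))]
def pvMkJ (w : String) (items : List String) : List (String × String) :=
  [("word", w), ("description", PySem.Str.join "\n" items)]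

-- the non-empty lines of ls (same predicate term as in pvJoinNE)
def pvNE (ls : List String) : List String := ls.filter (fun l => decide (l ≠ ""))

-- recursive characterisation of A's loop: current word w, accumulated description lines dp
def pvG (w : String) (dp : List String) : List String → List (List (String × String))
  | [] => [pvMkJ w dp]
  | l :: ls =>
    if pvHeaderB l then
      (if w ≠ "" then [pvMkJ w dp] else []) ++ pvG (pvWordB l) [] ls
    else if l ≠ "" then pvG w (dp ++ [l]) ls else pvG w dp ls

-- header segments: (word, raw body lines up to the next header)
def pvSegs : List String → List (String × List String)
  | [] => []
  | l :: ls =>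
    if pvHeaderB l then (pvWordB l, ls.takeWhile (fun x => !pvHeaderB x)) :: pvSegs ls
    else pvSegs ls

-- render segments: every non-last segment needs a non-empty word, the last is unconditional
def pvRend : List (String × List String) → List (List (String × String))
  | [] => []
  | [(w, b)] => [pvMkJ w (pvNE b)]
  | (w, b) :: s :: t => (if w ≠ "" then [pvMkJ w (pvNE b)] else []) ++ pvRend (s :: t)

def pvIdxs (ls : List String) : List Nat :=
  ls.zipIdx.filterMap (fun p => if pvHeaderB p.1 then some p.2 else none)

def pvRowsOf (lines : List String) (idxs : List Nat) : List (List (String × String)) :=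
  (idxs.dropLast.zip idxs.tail).filterMap (fun ij =>
    let w := pvWordB (lines.getD ij.1 "")
    if w ≠ "" then
      some (pvMkJ w (pvNE ((lines.drop (ij.1 + 1)).take (ij.2 - (ij.1 + 1)))))
    else none)

def pvLastOf (lines : List String) (i : Nat) : List (String × String) :=
  pvMkJ (pvWordB (lines.getD i "")) (pvNE (lines.drop (i + 1)))

lemma pvHdA_iff (l : String) :
    (PySem.Str.slice l (some 0) (some 6) = "######") ↔ pvHeaderB l = true := by
  rw [pvHeaderB, PySem.Str.startswith_eq, PySem.Chars.startswith_iff, List.prefix_iff_eq_take]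
  rw [← String.toList_inj]
  have h : (PySem.Str.slice l (some 0) (some 6)).toList = l.toList.take 6 := by
    have := PySem.List.slice_natCast (l.toList) 0 6
    simp at this ⊢
    simpa using this
  rw [h]
  constructor
  · intro hh; simpa using hh.symm
  · intro hh; simpa using hh.symm

lemma pvGetD_word (w : String) :
    PySem.Dict.getD (⟨[("word", w)]⟩ : PySem.Dict String String) "word" "" = w := by
  simp [PySem.Dict.getD, PySem.Dict.get?]

lemma pvInsert_desc (w d : String) :
    (PySem.Dict.insert (⟨[("word", w)]⟩ : PySem.Dict String String) "description" d).items
      = [("word", w), ("description", d)] := by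
  simp [PySem.Dict.insert, PySem.Dict.contains]

-- A's fold equals pvG
lemma pvFoldA (ls : List String) : ∀ (w : String) (rows : List (List (String × String)))
    (dp : List String),
    pvFinA (ls.foldl pvStepA (⟨[("word", w)]⟩, rows, dp)) = rows ++ pvG w dp ls := by
  induction ls with
  | nil => intro w rows dp; simp [pvFinA, pvG, pvMkJ, pvInsert_desc]
  | cons l ls ih =>
    intro w rows dp
    by_cases hh : pvHeaderB l = true
    · have hA : PySem.Str.slice l (some 0) (some 6) = "######" := (pvHdA_iff l).mpr hh
      simp only [List.foldl_cons, pvStepA, hA, pvGetD_word, pvInsert_desc]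
      by_cases hw : w = ""
      · simp [hw, pvG, hh, ih, pvWordB]
      · simp [hw, pvG, hh, ih, pvWordB, pvMkJ]
    · have hA : ¬ (PySem.Str.slice l (some 0) (some 6) = "######") := fun c => hh ((pvHdA_iff l).mp c)
      simp only [List.foldl_cons, pvStepA, if_neg hA]
      by_cases he : l = ""
      · subst he; simp [pvG, hh, ih]
      · simp [he, pvG, hh, ih]

lemma pvIdxs_cons (l : String) (ls : List String) :
    pvIdxs (l :: ls) = (if pvHeaderB l then [0] else []) ++ (pvIdxs ls).map (· + 1) := by
  simp only [pvIdxs, List.zipIdx_cons, List.zipIdx_succ, List.filterMap_cons, List.filterMap_map]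
  have hfm : List.filterMap ((fun p => if pvHeaderB p.1 = true then some p.2 else none) ∘
        (fun (x : String × Nat) => (x.1, x.2 + 1))) ls.zipIdx
      = List.map (· + 1) (List.filterMap (fun p => if pvHeaderB p.1 = true then some p.2 else none) ls.zipIdx) := by
    rw [List.map_filterMap]
    congr 1
    funext x
    by_cases h : pvHeaderB x.1 <;> simp [h]
  by_cases hh : pvHeaderB l
  · simpa [hh] using hfm
  · simpa [hh] using hfm

lemma pvIdxs_nil_iff (ls : List String) :
    pvIdxs ls = [] ↔ ∀ l ∈ ls, pvHeaderB l = false := by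
  induction ls with
  | nil => simp [pvIdxs]
  | cons l ls ih =>
    rw [pvIdxs_cons]
    by_cases hh : pvHeaderB l <;> simp [hh, ih]

lemma pvSegs_nil_iff (ls : List String) :
    pvSegs ls = [] ↔ ∀ l ∈ ls, pvHeaderB l = false := by
  induction ls with
  | nil => simp [pvSegs]
  | cons l ls ih =>
    by_cases hh : pvHeaderB l <;> simp [pvSegs, hh, ih]

lemma pvRend_cons (w : String) (b : List String) (t : List (String × List String)) (ht : t ≠ []) :
    pvRend ((w, b) :: t) = (if w ≠ "" then [pvMkJ w (pvNE b)] else []) ++ pvRend t := by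
  cases t with
  | nil => exact absurd rfl ht
  | cons s t => rfl

-- characterisation of pvG via segments
lemma pvG_eq (ls : List String) : ∀ (w : String) (dp : List String),
    pvG w dp ls =
      if pvSegs ls = [] then [pvMkJ w (dp ++ pvNE ls)]
      else (if w ≠ "" then [pvMkJ w (dp ++ pvNE (ls.takeWhile (fun x => !pvHeaderB x)))] else [])
        ++ pvRend (pvSegs ls) := by
  induction ls with
  | nil => intro w dp; simp [pvG, pvSegs, pvNE]
  | cons l ls ih =>
    intro w dp
    by_cases hh : pvHeaderB l
    · have hsegs : pvSegs (l :: ls) = (pvWordB l, ls.takeWhile (fun x => !pvHeaderB x)) :: pvSegs ls := by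
        simp [pvSegs, hh]
      have htw : (l :: ls).takeWhile (fun x => !pvHeaderB x) = [] := by
        simp [hh]
      rw [hsegs, htw]
      by_cases hs : pvSegs ls = []
      · have hfree : ∀ x ∈ ls, pvHeaderB x = false := (pvSegs_nil_iff ls).mp hs
        have htws : ls.takeWhile (fun x => !pvHeaderB x) = ls :=
          List.takeWhile_eq_self_iff.mpr (by intro x hx; simp [hfree x hx])
        simp only [pvG, hh, ih, hs, htws]
        simp [pvRend, pvNE]
      · rw [pvRend_cons _ _ _ hs]
        simp only [pvG, hh, ih, hs]
        simp [pvNE]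
    · have hsegs : pvSegs (l :: ls) = pvSegs ls := by simp [pvSegs, hh]
      have htw : (l :: ls).takeWhile (fun x => !pvHeaderB x) = l :: ls.takeWhile (fun x => !pvHeaderB x) := by
        simp [hh]
      rw [hsegs, htw]
      by_cases he : l = ""
      · subst he
        have : pvHeaderB "" = false := by simpa using hh
        simp only [pvG, this, Bool.false_eq_true, if_false, ih]
        simp [pvNE]
      · simp only [pvG, hh, Bool.false_eq_true, if_false, if_pos he, ih]
        by_cases hs : pvSegs ls = [] <;> simp [hs, pvNE, he]

lemma pvTake_eq_takeWhile (ls : List String) : ∀ (i : Nat) (rest : List Nat),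
    pvIdxs ls = i :: rest → ls.take i = ls.takeWhile (fun x => !pvHeaderB x) := by
  induction ls with
  | nil => intro i rest h; simp [pvIdxs] at h
  | cons l ls ih =>
    intro i rest h
    rw [pvIdxs_cons] at h
    by_cases hh : pvHeaderB l
    · simp only [hh, if_true] at h
      have hi : i = 0 := (List.cons.inj h).1.symm
      subst hi
      simp [hh]
    · simp only [hh, Bool.false_eq_true, if_false, List.nil_append] at h
      cases hI : pvIdxs ls with
      | nil => rw [hI] at h; simp at h
      | cons a t =>
        rw [hI, List.map_cons] at h
        have hi : i = a + 1 := (List.cons.inj h).1.symm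
        subst hi
        simp only [List.take_succ_cons, List.takeWhile_cons, hh]
        simp [ih a t hI]

lemma pvRowsOf_shift (l : String) (ls : List String) (idxs : List Nat) :
    pvRowsOf (l :: ls) (idxs.map (· + 1)) = pvRowsOf ls idxs := by
  simp only [pvRowsOf, ← List.map_dropLast, ← List.map_tail, List.zip_map, List.filterMap_map]
  apply List.filterMap_congr
  intro ij _
  simp [Prod.map, List.drop_succ_cons, Nat.succ_sub_succ]

lemma pvAlt_eq (lines : List String) :
    splitWordDescription_alt lines =
      if h : pvIdxs lines = [] then [pvMkJ "" (pvNE lines)]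
      else pvRowsOf lines (pvIdxs lines) ++ [pvLastOf lines ((pvIdxs lines).getLast h)] := by
  rfl

lemma pvAlt_eq' (lines : List String) (h : pvIdxs lines ≠ []) :
    splitWordDescription_alt lines =
      pvRowsOf lines (pvIdxs lines) ++ [pvLastOf lines ((pvIdxs lines).getLast?.getD 0)] := by
  rw [pvAlt_eq, dif_neg h, List.getLast?_eq_some_getLast h]
  rfl

lemma pvLastOf_shift (l : String) (ls : List String) (i : Nat) :
    pvLastOf (l :: ls) (i + 1) = pvLastOf ls i := by
  simp [pvLastOf, List.drop_succ_cons]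

lemma pvGetLast_map_succ (I : List Nat) (h : I ≠ []) :
    (I.map (· + 1)).getLast?.getD 0 = I.getLast?.getD 0 + 1 := by
  rw [List.getLast?_map]
  cases hg : I.getLast? with
  | none => exact absurd (List.getLast?_eq_none_iff.mp hg) h
  | some g => simp

lemma pvBMain (lines : List String) :
    splitWordDescription_alt lines =
      if pvSegs lines = [] then [pvMkJ "" (pvNE lines)] else pvRend (pvSegs lines) := by
  induction lines with
  | nil =>
    rw [pvAlt_eq]
    simp [pvIdxs, pvSegs]
  | cons l ls ih =>
    by_cases hh : pvHeaderB l
    · have hsegs : pvSegs (l :: ls)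
          = (pvWordB l, ls.takeWhile (fun x => !pvHeaderB x)) :: pvSegs ls := by
        simp [pvSegs, hh]
      cases hI : pvIdxs ls with
      | nil =>
        have hfree := (pvIdxs_nil_iff ls).mp hI
        have hsegsls : pvSegs ls = [] := (pvSegs_nil_iff ls).mpr hfree
        have hidx : pvIdxs (l :: ls) = [0] := by rw [pvIdxs_cons, hI]; simp [hh]
        have hne : pvIdxs (l :: ls) ≠ [] := by simp [hidx]
        have htws : ls.takeWhile (fun x => !pvHeaderB x) = ls :=
          List.takeWhile_eq_self_iff.mpr (by intro x hx; simp [hfree x hx])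
        rw [pvAlt_eq' _ hne, hidx, hsegs, hsegsls, htws, if_neg (by simp)]
        simp [pvRowsOf, pvLastOf, pvRend]
      | cons i0 rest =>
        have hne' : pvIdxs ls ≠ [] := by simp [hI]
        have hsegsls : pvSegs ls ≠ [] := by
          intro c; exact hne' ((pvIdxs_nil_iff ls).mpr ((pvSegs_nil_iff ls).mp c))
        have hidx : pvIdxs (l :: ls) = 0 :: (pvIdxs ls).map (· + 1) := by
          rw [pvIdxs_cons]; simp [hh]
        have hne : pvIdxs (l :: ls) ≠ [] := by simp [hidx]
        have htake : ls.take i0 = ls.takeWhile (fun x => !pvHeaderB x) :=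
          pvTake_eq_takeWhile ls i0 rest hI
        have hrows : pvRowsOf (l :: ls) (0 :: (i0 :: rest).map (· + 1)) =
            (if pvWordB l ≠ "" then [pvMkJ (pvWordB l) (pvNE (ls.take i0))] else [])
              ++ pvRowsOf ls (i0 :: rest) := by
          rw [← pvRowsOf_shift l ls (i0 :: rest)]
          simp only [pvRowsOf, List.map_cons, List.dropLast_cons_of_ne_nil (List.cons_ne_nil _ _),
            List.tail_cons, List.zip_cons_cons, List.filterMap_cons]
          by_cases hw : pvWordB l = "" <;> simp [hw]
        have hlast : ((0 :: (i0 :: rest).map (· + 1)).getLast?.getD 0)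
            = ((i0 :: rest).getLast?.getD 0) + 1 := by
          rw [List.map_cons, List.getLast?_cons_cons]
          simpa using pvGetLast_map_succ (i0 :: rest) (by simp)
        rw [pvAlt_eq' _ hne, hidx, hI, hsegs, if_neg (by simp), hrows, hlast,
          pvLastOf_shift, pvRend_cons _ _ _ hsegsls, htake]
        rw [pvAlt_eq' _ hne', hI] at ih
        rw [if_neg hsegsls] at ih
        rw [List.append_assoc, ih]
    · have hsegs : pvSegs (l :: ls) = pvSegs ls := by simp [pvSegs, hh]
      have hidx : pvIdxs (l :: ls) = (pvIdxs ls).map (· + 1) := by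
        rw [pvIdxs_cons]; simp [hh]
      cases hI : pvIdxs ls with
      | nil =>
        have hfree := (pvIdxs_nil_iff ls).mp hI
        have hsegsls : pvSegs ls = [] := (pvSegs_nil_iff ls).mpr hfree
        have hzero : pvIdxs (l :: ls) = [] := by rw [hidx, hI]; rfl
        rw [pvAlt_eq, dif_pos hzero, hsegs, if_pos hsegsls]
      | cons i0 rest =>
        have hne' : pvIdxs ls ≠ [] := by simp [hI]
        have hsegsls : pvSegs ls ≠ [] := by
          intro c; exact hne' ((pvIdxs_nil_iff ls).mpr ((pvSegs_nil_iff ls).mp c))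
        have hne : pvIdxs (l :: ls) ≠ [] := by rw [hidx, hI]; simp
        have hlast : ((pvIdxs ls).map (· + 1)).getLast?.getD 0 = ((pvIdxs ls).getLast?.getD 0) + 1 := by
          rw [hI]
          simpa using pvGetLast_map_succ (i0 :: rest) (by simp)
        rw [pvAlt_eq' _ hne, hidx, hlast, pvRowsOf_shift, pvLastOf_shift, hsegs, if_neg hsegsls]
        rw [pvAlt_eq' _ hne'] at ih
        rw [if_neg hsegsls] at ih
        exact ih

-- ===== VERDICT (by name: the statement is the Claim_ definition above) =====
theorem splitWordDescription_spec : Claim_equal_splitWordDescription := by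
  intro lines _
  unfold Spec_splitWordDescription
  have hA : splitWordDescription lines = pvG "" [] lines := by
    have := pvFoldA lines "" [] []
    simpa [splitWordDescription] using this
  rw [hA, pvBMain, pvG_eq]
  by_cases h : pvSegs lines = []
  · simp [h]
  · simp [h]
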